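-- pv_equiv track=rewrite | github.com/liuyingxuvka/Job-Hunter | desktop_app/src/jobflow_desktop_app/app/dialogs/ai_settings.py | _ordered_model_ids
-- ===== SOURCE A (Python) =====
-- def _ordered_model_ids(models: list[str], selected_model: str = "") -> list[str]:
--     ordered: list[str] = []
--     seen: set[str] = set()
--
--     def push(raw: str) -> None:
--         text = str(raw or "").strip()
--         if not text:
--             return
--         key = text.casefold()
--         if key in seen:
--             return
--         seen.add(key)
--         ordered.append(text)
--
--     for item in models:
--         push(item)
--     if selected_model:
--         push(selected_model)
--     ordered.sort(key=lambda item: item.casefold())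
--     return ordered
-- ===== SOURCE B (Python) =====
-- def _ordered_model_ids(models: list[str], selected_model: str = "") -> list[str]:
--     # Sort-then-adjacent-dedup instead of set-dedup-then-sort.
--     candidates = [t for t in (str(x or "").strip()
--                               for x in models + ([selected_model] if selected_model else []))
--                   if t]
--     candidates.sort(key=str.casefold)  # stable: first case-variant (models before selected) wins
--     out: list[str] = []
--     for t in candidates:
--         if not out or out[-1].casefold() != t.casefold():
--             out.append(t)
--     return out
-- ===== Notes on version B (the rewrite author's own statement) =====
-- stated objective: alternative
-- what changed: Replaces A's set-based first-occurrence dedup followed by a sort with one pass that stably sorts all stripped non-empty candidates by casefold and then removes adjacent equal-casefold duplicates, keeping the first of each run.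
import Mathlib
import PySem

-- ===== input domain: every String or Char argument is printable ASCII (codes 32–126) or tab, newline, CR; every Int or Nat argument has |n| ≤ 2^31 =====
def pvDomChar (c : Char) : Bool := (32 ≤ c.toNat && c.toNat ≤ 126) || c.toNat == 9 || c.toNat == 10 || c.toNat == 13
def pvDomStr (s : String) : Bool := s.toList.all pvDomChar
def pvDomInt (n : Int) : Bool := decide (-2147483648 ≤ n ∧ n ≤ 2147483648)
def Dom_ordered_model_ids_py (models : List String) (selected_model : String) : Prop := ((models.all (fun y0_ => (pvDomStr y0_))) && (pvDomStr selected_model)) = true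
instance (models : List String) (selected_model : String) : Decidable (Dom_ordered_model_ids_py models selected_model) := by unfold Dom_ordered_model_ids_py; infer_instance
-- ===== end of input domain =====

-- B replaces A's set-dedup-then-sort with stable-sort-then-adjacent-dedup (same result, different decomposition).
-- Python's `casefold` is ported as `PySem.Str.lower` (identical on the ASCII input domain).

-- ===== PORT A =====
-- the inner `push`: `str(raw or "")` is `raw` itself for a str argument when non-empty
-- and `""` otherwise, and `"".strip() = ""`, so `.strip raw` is exact.
def pvPushA (st : List String × PySem.Set String) (raw : String) : List String × PySem.Set String :=
  let text := PySem.Str.strip raw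
  if text = "" then st
  else
    let key := PySem.Str.lower text
    if PySem.Set.contains st.2 key then st
    else (st.1 ++ [text], PySem.Set.add st.2 key)

def ordered_model_ids_py (models : List String) (selected_model : String) : List String :=
  let st0 : List String × PySem.Set String := ([], PySem.Set.empty)
  let st1 := models.foldl pvPushA st0
  let st2 := if selected_model ≠ "" then pvPushA st1 selected_model else st1
  PySem.List.sorted st2.1 (fun item => PySem.Str.lower item) false

-- ===== PORT B =====
def ordered_model_ids_py_alt (models : List String) (selected_model : String) : List String :=
  let candidates := ((models ++ (if selected_model ≠ "" then [selected_model] else [])).map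
      PySem.Str.strip).filter (fun t => t ≠ "")
  let sortedCands := PySem.List.sorted candidates (fun t => PySem.Str.lower t) false
  sortedCands.foldl (fun out t =>
    match out.getLast? with
    | none => out ++ [t]
    | some p => if PySem.Str.lower p = PySem.Str.lower t then out else out ++ [t]) []

-- ===== PRECONDITION & SPEC =====
def Spec_ordered_model_ids_py (models : List String) (selected_model : String) (out : List String) : Prop := out = ordered_model_ids_py_alt models selected_model
instance (models : List String) (selected_model : String) (out : List String) : Decidable (Spec_ordered_model_ids_py models selected_model out) := by unfold Spec_ordered_model_ids_py; infer_instance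

-- ===== CLAIM (what is proved, stated in full; the proofs are below) =====
def Claim_equal_ordered_model_ids_py : Prop := ∀ (models : List String) (selected_model : String), Dom_ordered_model_ids_py models selected_model → Spec_ordered_model_ids_py models selected_model (ordered_model_ids_py models selected_model)

-- ===== LEMMAS AND PROOFS =====

-- abbreviations used only by the proofs
def pvKey (s : String) : String := PySem.Str.lower s

def pvValid (l : List String) : List String := (l.map PySem.Str.strip).filter (fun t => t ≠ "")

def pvDedupK (seen : PySem.Set String) : List String → List String
  | [] => []
  | t :: r => if PySem.Set.contains seen (pvKey t) then pvDedupK seen r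
              else t :: pvDedupK (PySem.Set.add seen (pvKey t)) r

def pvSeenK (seen : PySem.Set String) : List String → PySem.Set String
  | [] => seen
  | t :: r => if PySem.Set.contains seen (pvKey t) then pvSeenK seen r
              else pvSeenK (PySem.Set.add seen (pvKey t)) r

def pvAdjK : Option String → List String → List String
  | _, [] => []
  | none, t :: r => t :: pvAdjK (some (pvKey t)) r
  | some p, t :: r => if p = pvKey t then pvAdjK (some p) r else t :: pvAdjK (some (pvKey t)) r

def pvFirstK (l : List String) (v : String) : Option String := (l.filter (fun y => pvKey y == v)).head?

-- A's loop computes the first-occurrence-per-key dedup of the valid candidates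
theorem pvFoldA (l : List String) : ∀ (o : List String) (s : PySem.Set String),
    l.foldl pvPushA (o, s) = (o ++ pvDedupK s (pvValid l), pvSeenK s (pvValid l)) := by
  induction l with
  | nil => intro o s; simp [pvValid, pvDedupK, pvSeenK]
  | cons raw r ih =>
    intro o s
    simp only [List.foldl_cons]
    by_cases h : PySem.Str.strip raw = ""
    · rw [show pvPushA (o, s) raw = (o, s) by simp [pvPushA, h]]
      rw [ih]
      simp [pvValid, h]
    · have hv : pvValid (raw :: r) = PySem.Str.strip raw :: pvValid r := by
        simp [pvValid, h]
      by_cases hc : pvKey (PySem.Str.strip raw) ∈ s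
      · rw [show pvPushA (o, s) raw = (o, s) by simp [pvPushA, h, pvKey] at hc ⊢; simp [hc]]
        rw [ih, hv]
        simp [pvDedupK, pvSeenK, hc]
      · rw [show pvPushA (o, s) raw
            = (o ++ [PySem.Str.strip raw], PySem.Set.add s (pvKey (PySem.Str.strip raw))) by
          simp [pvPushA, h, pvKey] at hc ⊢; simp [hc]]
        rw [ih, hv]
        simp [pvDedupK, pvSeenK, hc]

-- A unfolded
theorem pvA_eq (models : List String) (sel : String) :
    ordered_model_ids_py models sel =
      PySem.List.sorted
        (pvDedupK PySem.Set.empty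
          (pvValid (models ++ (if sel ≠ "" then [sel] else [])))) pvKey false := by
  unfold ordered_model_ids_py
  by_cases hs : sel = ""
  · simp only [hs, ne_eq, not_true_eq_false, if_false]
    rw [pvFoldA]
    simp only [List.nil_append, List.append_nil]
    rfl
  · simp only [ne_eq, hs, not_false_eq_true, if_true]
    rw [show pvPushA (models.foldl pvPushA ([], PySem.Set.empty)) sel
        = (models ++ [sel]).foldl pvPushA ([], PySem.Set.empty) by simp [List.foldl_append]]
    rw [pvFoldA]
    simp only [List.nil_append]
    rfl

-- B's loop is pvAdjK
theorem pvLoopB (l : List String) : ∀ (acc : List String),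
    l.foldl (fun out t =>
      match out.getLast? with
      | none => out ++ [t]
      | some p => if PySem.Str.lower p = PySem.Str.lower t then out else out ++ [t]) acc
    = acc ++ pvAdjK (acc.getLast?.map pvKey) l := by
  induction l with
  | nil => intro acc; simp [pvAdjK]
  | cons t r ih =>
    intro acc
    simp only [List.foldl_cons]
    rcases h : acc.getLast? with _ | p
    · rw [List.getLast?_eq_none_iff] at h
      subst h
      simp only [List.nil_append]
      rw [ih]
      simp [pvAdjK, pvKey]
    · by_cases he : PySem.Str.lower p = PySem.Str.lower t
      · simp only [if_pos he]
        rw [ih, h]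
        simp [pvAdjK, pvKey, he]
      · simp only [if_neg he]
        rw [ih]
        simp [pvAdjK, pvKey, he]

-- B unfolded
theorem pvB_eq (models : List String) (sel : String) :
    ordered_model_ids_py_alt models sel =
      pvAdjK none
        (PySem.List.sorted (pvValid (models ++ (if sel ≠ "" then [sel] else []))) pvKey false) := by
  unfold ordered_model_ids_py_alt
  rw [pvLoopB]
  rfl

-- stability of insertion into a key-sorted list, per key class
theorem pvFilter_insertBy (v : String) (x : String) (ys : List String)
    (hys : ys.Pairwise (fun a b => pvKey a ≤ pvKey b)) :
    (PySem.List.insertBy (fun a b => decide (pvKey a < pvKey b)) x ys).filter (fun y => pvKey y == v)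
      = if pvKey x == v then ys.filter (fun y => pvKey y == v) ++ [x]
        else ys.filter (fun y => pvKey y == v) := by
  induction ys with
  | nil =>
    simp only [PySem.List.insertBy, List.filter_nil]
    by_cases hxv : pvKey x == v <;> simp [hxv]
  | cons y ys ih =>
    obtain ⟨hall, hy2⟩ := List.pairwise_cons.mp hys
    simp only [PySem.List.insertBy]
    by_cases hb : pvKey x < pvKey y
    · simp only [if_pos (by simpa using hb : (decide (pvKey x < pvKey y)) = true)]
      by_cases hxv : (pvKey x == v) = true
      · have hx : pvKey x = v := by simpa using hxv
        have hnone : List.filter (fun z => pvKey z == v) (y :: ys) = [] := by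
          apply List.filter_eq_nil_iff.mpr
          intro z hz
          have hyz : pvKey y ≤ pvKey z := by
            rcases List.mem_cons.mp hz with rfl | hz'
            · exact le_refl _
            · exact hall z hz'
          simp only [beq_iff_eq]
          intro hzv
          exact absurd (lt_of_lt_of_le hb hyz) (by rw [hzv, hx]; exact lt_irrefl v)
        rw [List.filter_cons, hnone]
        simp [hxv]
      · rw [List.filter_cons, List.filter_cons]
        simp [hxv]
    · simp only [if_neg (by simpa using hb : ¬ (decide (pvKey x < pvKey y)) = true)]
      rw [List.filter_cons, ih hy2, List.filter_cons]
      by_cases hyv : (pvKey y == v) = true <;> by_cases hxv : (pvKey x == v) = true <;>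
        simp [hyv, hxv]

-- stability of the sort: each casefold class keeps its input order
theorem pvFilter_sorted (v : String) (l : List String) :
    (PySem.List.sorted l pvKey false).filter (fun y => pvKey y == v)
      = l.filter (fun y => pvKey y == v) := by
  induction l using List.reverseRecOn with
  | nil => simp [PySem.List.sorted]
  | append_singleton l x ih =>
    rw [PySem.List.sorted_eq_foldl_insertBy, List.foldl_append, List.foldl_cons, List.foldl_nil,
        ← PySem.List.sorted_eq_foldl_insertBy]
    rw [pvFilter_insertBy v x _ (PySem.List.sorted_pairwise l pvKey), ih]
    rw [List.filter_append]
    by_cases hxv : (pvKey x == v) = true <;> simp [hxv]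

-- pvAdjK on a key-sorted list: strictly increasing keys, all above the bound
theorem pvAdjK_pairwise : ∀ (l : List String),
    l.Pairwise (fun a b => pvKey a ≤ pvKey b) →
    ∀ (p : Option String), (∀ v, p = some v → ∀ x ∈ l, v ≤ pvKey x) →
    (pvAdjK p l).Pairwise (fun a b => pvKey a < pvKey b) ∧
      (∀ v, p = some v → ∀ x ∈ pvAdjK p l, v < pvKey x) := by
  intro l
  induction l with
  | nil =>
    intro _ p _
    refine ⟨?_, ?_⟩ <;> cases p <;> simp [pvAdjK]
  | cons t r ih =>
    intro hp p hb
    obtain ⟨hall, hr⟩ := List.pairwise_cons.mp hp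
    cases p with
    | none =>
      obtain ⟨h1, h2⟩ := ih hr (some (pvKey t))
        (fun v hv x hx => by cases hv; exact hall x hx)
      refine ⟨?_, by simp⟩
      simp only [pvAdjK]
      exact List.pairwise_cons.mpr ⟨fun b hbm => h2 _ rfl b hbm, h1⟩
    | some q =>
      by_cases hq : q = pvKey t
      · obtain ⟨h1, h2⟩ := ih hr (some q)
          (fun v hv x hx => by cases hv; exact hb q rfl x (List.mem_cons_of_mem t hx))
        simp only [pvAdjK, if_pos hq]
        exact ⟨h1, fun v hv x hx => by cases hv; exact h2 q rfl x hx⟩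
      · obtain ⟨h1, h2⟩ := ih hr (some (pvKey t))
          (fun v hv x hx => by cases hv; exact hall x hx)
        have hqt : q < pvKey t := lt_of_le_of_ne (hb q rfl t (by simp)) hq
        simp only [pvAdjK, if_neg hq]
        refine ⟨List.pairwise_cons.mpr ⟨fun b hbm => h2 _ rfl b hbm, h1⟩, ?_⟩
        intro v hv x hx
        cases hv
        rcases List.mem_cons.mp hx with rfl | hx'
        · exact hqt
        · exact lt_trans hqt (h2 _ rfl x hx')

-- membership in pvDedupK: exactly the first element of each key class, key unseen
theorem pvMem_dedupK : ∀ (l : List String) (s : PySem.Set String) (x : String),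
    x ∈ pvDedupK s l ↔ PySem.Set.contains s (pvKey x) = false ∧ pvFirstK l (pvKey x) = some x := by
  intro l
  induction l with
  | nil => intro s x; simp [pvDedupK, pvFirstK]
  | cons t r ih =>
    intro s x
    by_cases hc : pvKey t ∈ s
    · have hcc : PySem.Set.contains s (pvKey t) = true := by
        simp [PySem.Set.contains, hc]
      have key : ∀ y : String, PySem.Set.contains s (pvKey y) = false →
          pvFirstK (t :: r) (pvKey y) = pvFirstK r (pvKey y) := by
        intro y hns
        have hne : (pvKey t == pvKey y) = false := by
          simp only [beq_eq_false_iff_ne, ne_eq]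
          intro he
          rw [← he] at hns
          rw [hcc] at hns
          cases hns
        simp [pvFirstK, hne]
      rw [show pvDedupK s (t :: r) = pvDedupK s r by simp [pvDedupK, hc], ih]
      constructor
      · rintro ⟨hns, hf⟩
        exact ⟨hns, by rw [key x hns]; exact hf⟩
      · rintro ⟨hns, hf⟩
        refine ⟨hns, ?_⟩
        rw [key x hns] at hf
        exact hf
    · have hcc : PySem.Set.contains s (pvKey t) = false := by
        simp [PySem.Set.contains]
        exact hc
      rw [show pvDedupK s (t :: r) = t :: pvDedupK (PySem.Set.add s (pvKey t)) r by
        simp [pvDedupK, hc]]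
      by_cases hx : x = t
      · subst hx
        simp only [List.mem_cons, true_or, true_iff]
        refine ⟨hcc, ?_⟩
        simp [pvFirstK]
      · rw [List.mem_cons, or_iff_right hx, ih]
        by_cases hk : pvKey x = pvKey t
        · have h1 : PySem.Set.contains (PySem.Set.add s (pvKey t)) (pvKey x) = true := by
            have : pvKey x ∈ PySem.Set.add s (pvKey t) :=
              (PySem.Set.mem_add s (pvKey t) (pvKey x)).mpr (Or.inr hk)
            simp [PySem.Set.contains, this]
          have h2 : pvFirstK (t :: r) (pvKey x) = some t := by
            simp [pvFirstK, hk.symm]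
          constructor
          · rintro ⟨hns, -⟩
            rw [h1] at hns
            cases hns
          · rintro ⟨-, hf⟩
            rw [h2] at hf
            exact absurd (Option.some_injective _ hf).symm hx
        · have h1 : PySem.Set.contains (PySem.Set.add s (pvKey t)) (pvKey x)
              = PySem.Set.contains s (pvKey x) := by
            by_cases hm : pvKey x ∈ s
            · have : pvKey x ∈ PySem.Set.add s (pvKey t) :=
                (PySem.Set.mem_add s (pvKey t) (pvKey x)).mpr (Or.inl hm)
              simp [PySem.Set.contains, this, hm]
            · have : pvKey x ∉ PySem.Set.add s (pvKey t) := by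
                intro hmem
                rcases (PySem.Set.mem_add s (pvKey t) (pvKey x)).mp hmem with h | h
                · exact hm h
                · exact hk h
              simp [PySem.Set.contains, this, hm]
          have h2 : pvFirstK (t :: r) (pvKey x) = pvFirstK r (pvKey x) := by
            have hne : (pvKey t == pvKey x) = false := by
              simp only [beq_eq_false_iff_ne, ne_eq]
              exact fun he => hk he.symm
            simp [pvFirstK, hne]
          rw [h1, h2]

theorem pvFirstK_mem {l : List String} {v x : String} (h : pvFirstK l v = some x) :
    x ∈ l ∧ pvKey x = v := by
  unfold pvFirstK at h
  cases hfl : List.filter (fun y => pvKey y == v) l with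
  | nil => rw [hfl] at h; cases h
  | cons a as =>
    rw [hfl] at h
    simp only [List.head?_cons, Option.some.injEq] at h
    subst h
    have hx : a ∈ List.filter (fun y => pvKey y == v) l := by
      rw [hfl]; exact List.mem_cons_self
    exact ⟨List.mem_of_mem_filter hx, by simpa using List.of_mem_filter hx⟩

-- membership in pvAdjK on a key-sorted list: the first element of each key class above the bound
theorem pvMem_adjK : ∀ (l : List String),
    l.Pairwise (fun a b => pvKey a ≤ pvKey b) →
    ∀ (p : Option String), (∀ v, p = some v → ∀ x ∈ l, v ≤ pvKey x) →
    ∀ x, x ∈ pvAdjK p l ↔ ((∀ v, p = some v → v ≠ pvKey x) ∧ pvFirstK l (pvKey x) = some x) := by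
  intro l
  induction l with
  | nil =>
    intro _ p _ x
    cases p <;> simp [pvAdjK, pvFirstK]
  | cons t r ih =>
    intro hp p hb x
    obtain ⟨hall, hr⟩ := List.pairwise_cons.mp hp
    have hfirst_self : pvFirstK (t :: r) (pvKey t) = some t := by
      simp [pvFirstK]
    have hfirst_ne : ∀ y : String, pvKey y ≠ pvKey t →
        pvFirstK (t :: r) (pvKey y) = pvFirstK r (pvKey y) := by
      intro y hy
      have hne : (pvKey t == pvKey y) = false := by
        simp only [beq_eq_false_iff_ne, ne_eq]
        exact fun he => hy he.symm
      simp [pvFirstK, hne]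
    have hfirst_eq : ∀ y : String, y ≠ t → pvKey y = pvKey t →
        ¬ pvFirstK (t :: r) (pvKey y) = some y := by
      intro y hy hk h
      rw [hk, hfirst_self] at h
      exact hy (Option.some_injective _ h).symm
    cases p with
    | none =>
      rw [show pvAdjK none (t :: r) = t :: pvAdjK (some (pvKey t)) r from rfl]
      by_cases hx : x = t
      · subst hx
        simp [hfirst_self]
      · rw [List.mem_cons, or_iff_right hx,
          ih hr (some (pvKey t)) (fun v hv y hy => by cases hv; exact hall y hy) x]
        by_cases hk : pvKey x = pvKey t
        · constructor
          · rintro ⟨hne, -⟩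
            exact absurd hk.symm (hne (pvKey t) rfl)
          · rintro ⟨-, hf⟩
            exact absurd hf (hfirst_eq x hx hk)
        · rw [hfirst_ne x hk]
          constructor
          · rintro ⟨hne, hf⟩
            exact ⟨fun v hv => absurd hv (by simp), hf⟩
          · rintro ⟨-, hf⟩
            exact ⟨fun v hv => by injection hv with h'; subst h'; exact fun he => hk he.symm, hf⟩
    | some q =>
      by_cases hq : q = pvKey t
      · rw [show pvAdjK (some q) (t :: r) = pvAdjK (some q) r by simp [pvAdjK, hq],
          ih hr (some q) (fun v hv y hy => by cases hv; exact hb q rfl y (List.mem_cons_of_mem t hy)) x]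
        by_cases hk : pvKey x = pvKey t
        · constructor
          · rintro ⟨hne, -⟩
            exact absurd (hq.trans hk.symm) (hne q rfl)
          · rintro ⟨hne, hf⟩
            by_cases hx : x = t
            · exact absurd (hq.trans hk.symm) (hne q rfl)
            · exact absurd hf (hfirst_eq x hx hk)
        · rw [hfirst_ne x hk]
      · rw [show pvAdjK (some q) (t :: r) = t :: pvAdjK (some (pvKey t)) r by simp [pvAdjK, hq]]
        have hqt : q < pvKey t := lt_of_le_of_ne (hb q rfl t (by simp)) hq
        by_cases hx : x = t
        · subst hx
          simp only [List.mem_cons, true_or, true_iff]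
          exact ⟨fun v hv => by injection hv with h'; subst h'; exact hq, hfirst_self⟩
        · rw [List.mem_cons, or_iff_right hx,
            ih hr (some (pvKey t)) (fun v hv y hy => by cases hv; exact hall y hy) x]
          by_cases hk : pvKey x = pvKey t
          · constructor
            · rintro ⟨hne, -⟩
              exact absurd hk.symm (hne (pvKey t) rfl)
            · rintro ⟨-, hf⟩
              exact absurd hf (hfirst_eq x hx hk)
          · rw [hfirst_ne x hk]
            constructor
            · rintro ⟨-, hf⟩
              have hxr : x ∈ r := (pvFirstK_mem hf).1
              have : q < pvKey x := lt_of_lt_of_le hqt (hall x hxr)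
              exact ⟨fun v hv => by injection hv with h'; subst h'; exact ne_of_lt this, hf⟩
            · rintro ⟨-, hf⟩
              exact ⟨fun v hv => by injection hv with h'; subst h'; exact fun he => hk he.symm, hf⟩

theorem pvDedupK_nodupKeys : ∀ (l : List String) (s : PySem.Set String),
    (pvDedupK s l).Pairwise (fun a b => pvKey a ≠ pvKey b) := by
  intro l
  induction l with
  | nil => intro s; simp [pvDedupK]
  | cons t r ih =>
    intro s
    by_cases hc : pvKey t ∈ s
    · rw [show pvDedupK s (t :: r) = pvDedupK s r by
        simp [pvDedupK, PySem.Set.contains, hc]]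
      exact ih s
    · rw [show pvDedupK s (t :: r) = t :: pvDedupK (PySem.Set.add s (pvKey t)) r by
        simp [pvDedupK, PySem.Set.contains, hc]]
      refine List.pairwise_cons.mpr ⟨?_, ih _⟩
      intro b hb he
      have hmem := (pvMem_dedupK r (PySem.Set.add s (pvKey t)) b).mp hb
      have hnb : pvKey b ∉ PySem.Set.add s (pvKey t) := by
        intro hm
        have : PySem.Set.contains (PySem.Set.add s (pvKey t)) (pvKey b) = true := by
          simp [PySem.Set.contains, hm]
        rw [this] at hmem
        exact absurd hmem.1 (by simp)
      exact hnb ((PySem.Set.mem_add s (pvKey t) (pvKey b)).mpr (Or.inr he.symm))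

-- the two dedups are permutations of each other
theorem pvPerm (l : List String) :
    (pvAdjK none (PySem.List.sorted l pvKey false)).Perm (pvDedupK PySem.Set.empty l) := by
  have hs := PySem.List.sorted_pairwise l pvKey
  have hfk : ∀ v, pvFirstK (PySem.List.sorted l pvKey false) v = pvFirstK l v := by
    intro v
    unfold pvFirstK
    rw [pvFilter_sorted]
  have hnd1 : (pvAdjK none (PySem.List.sorted l pvKey false)).Nodup :=
    ((pvAdjK_pairwise _ hs none (by simp)).1).imp
      (fun {a b} h he => absurd (he ▸ h) (lt_irrefl _))
  have hnd2 : (pvDedupK PySem.Set.empty l).Nodup :=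
    (pvDedupK_nodupKeys l PySem.Set.empty).imp (fun {a b} h he => h (congrArg pvKey he))
  rw [List.perm_ext_iff_of_nodup hnd1 hnd2]
  intro x
  rw [pvMem_adjK _ hs none (by simp) x, pvMem_dedupK l PySem.Set.empty x, hfk]
  simp [PySem.Set.contains, PySem.Set.empty]

-- ===== VERDICT (by name: the statement is the Claim_ definition above) =====
theorem ordered_model_ids_py_spec : Claim_equal_ordered_model_ids_py := by
  intro models sel _
  unfold Spec_ordered_model_ids_py
  rw [pvA_eq, pvB_eq]
  exact (PySem.List.sorted_eq_of_perm_of_pairwise_lt _ _ _ (pvPerm _)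
    (pvAdjK_pairwise _ (PySem.List.sorted_pairwise _ _) none (by simp)).1)
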